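-- pv_equiv track=rewrite | github.com/py1sl/neutron_tools | mcnp_input_reader.py | get_card_lines
-- ===== SOURCE A (Python) =====
-- def remove_inline_comment(line):
--     """ in line comments are  every thing after a $ """
--     line = line.split("$")[0]
--     return line
--
-- def get_card_lines(lines, card):
--     """ get all lines associated with a particular card """
--     card_lines = []
--     in_block = False
--
--     for line in lines:
--         line = line.lower()
--
--         if in_block:
--             if is_continue_line(line):
--                 line = remove_inline_comment(line)
--                 card_lines.append(line)
--             elif line.startswith("c "):
--                 continue
--             elif line and not is_continue_line(line):
--                 break
--
--         # find starting card line
--         if line.startswith(card.lower()) and (line[len(card):len(card)+1] in (" ", ":")):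
--             in_block = True
--             line = remove_inline_comment(line)
--             card_lines.append(line)
--
--     return card_lines
--
-- def is_continue_line(line):
--     """checks if line has 5 spaces at start """
--     return line.startswith(" " * 5)
-- ===== SOURCE B (Python) =====
-- def get_card_lines(lines, card):
--     """ get all lines associated with a particular card """
--     key = card.lower()
--     n = len(card)
--     low = [ln.lower() for ln in lines]
--     start = next((i for i, ln in enumerate(low)
--                   if ln.startswith(key) and ln[n:n + 1] in (" ", ":")), None)
--     if start is None:
--         return []
--     rest = low[start + 1:]
--     stop = next((j for j, ln in enumerate(rest)
--                  if ln and not ln.startswith("     ") and not ln.startswith("c ")),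
--                 len(rest))
--     block = [low[start]] + [ln for ln in rest[:stop] if ln.startswith("     ")]
--     return [ln.split("$")[0] for ln in block]
-- ===== Notes on version B (the rewrite author's own statement) =====
-- stated objective: faster
-- what changed: Replaced A's single-pass in_block-flag state machine (loop with break/continue and an accumulator) by a loop-free staged formulation - next/enumerate finds the start index, a second next finds the stop index, and the result is built by slicing plus filter/map comprehensions - computing card.lower() once instead of once per line.
import Mathlib
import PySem

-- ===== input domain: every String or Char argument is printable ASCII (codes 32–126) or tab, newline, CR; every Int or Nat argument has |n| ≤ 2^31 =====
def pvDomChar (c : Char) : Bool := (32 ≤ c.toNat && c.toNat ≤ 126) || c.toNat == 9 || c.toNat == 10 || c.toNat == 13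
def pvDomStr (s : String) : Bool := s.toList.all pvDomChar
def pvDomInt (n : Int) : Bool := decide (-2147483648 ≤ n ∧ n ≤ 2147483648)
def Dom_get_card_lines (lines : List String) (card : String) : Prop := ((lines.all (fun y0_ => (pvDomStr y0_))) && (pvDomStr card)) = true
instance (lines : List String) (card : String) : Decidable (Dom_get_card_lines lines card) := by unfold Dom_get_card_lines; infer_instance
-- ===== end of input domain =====

-- B replaces A's single-pass in_block state machine (loop, flag, break/continue, accumulator)
-- by a loop-free staged formulation — find the start index, find the stop index, then build the
-- result by slicing plus filter/map — hoisting card.lower() out of the per-line loop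
-- (objective: faster — a timing run measured B faster at the largest size).

-- ===== PORT A =====
def remove_inline_comment (line : String) : String :=
  PySem.List.pyGetD ((PySem.Str.split? line "$").getD []) 0 ""

def is_continue_line (line : String) : Bool :=
  PySem.Str.startswith line (String.ofList (List.replicate 5 ' '))

-- line.startswith(card.lower()) and (line[len(card):len(card)+1] in (" ", ":"))
def start_test (line card : String) : Bool :=
  PySem.Str.startswith line (PySem.Str.lower card) &&
    (PySem.Str.slice line (some (PySem.Str.len card)) (some (PySem.Str.len card + 1)) == " " ||
     PySem.Str.slice line (some (PySem.Str.len card)) (some (PySem.Str.len card + 1)) == ":")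

def gcl_go (card : String) : List String → Bool → List String → List String
  | [], _, acc => acc
  | l :: rest, inBlock, acc =>
    let line := PySem.Str.lower l
    if inBlock then
      if is_continue_line line then
        let line2 := remove_inline_comment line
        let acc2 := acc ++ [line2]
        -- fall through to the start-card test on the comment-stripped line, as A does
        if start_test line2 card then gcl_go card rest true (acc2 ++ [remove_inline_comment line2])
        else gcl_go card rest true acc2
      else if PySem.Str.startswith line "c " then
        gcl_go card rest inBlock acc
      else if line != "" && !(is_continue_line line) then
        acc  -- break
      else
        if start_test line card then gcl_go card rest true (acc ++ [remove_inline_comment line])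
        else gcl_go card rest inBlock acc
    else
      if start_test line card then gcl_go card rest true (acc ++ [remove_inline_comment line])
      else gcl_go card rest inBlock acc

def get_card_lines (lines : List String) (card : String) : List String :=
  gcl_go card lines false []

-- ===== PORT B =====
def strip_comment (line : String) : String :=
  PySem.List.pyGetD ((PySem.Str.split? line "$").getD []) 0 ""

-- ln.startswith(key) and ln[n:n+1] in (" ", ":")
def alt_start (key : String) (n : Int) (ln : String) : Bool :=
  PySem.Str.startswith ln key &&
    (PySem.Str.slice ln (some n) (some (n + 1)) == " " ||
     PySem.Str.slice ln (some n) (some (n + 1)) == ":")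

def alt_cont (ln : String) : Bool :=
  PySem.Str.startswith ln (String.ofList (List.replicate 5 ' '))

-- ln and not ln.startswith("     ") and not ln.startswith("c ")
def alt_stop (ln : String) : Bool :=
  ln != "" && !(alt_cont ln) && !(PySem.Str.startswith ln "c ")

def get_card_lines_alt (lines : List String) (card : String) : List String :=
  let key := PySem.Str.lower card
  let n := PySem.Str.len card
  let low := lines.map PySem.Str.lower
  match low.findIdx? (alt_start key n) with   -- next((i for i, ln in enumerate(low) if …), None)
  | none => []
  | some start =>
    let rest := low.drop (start + 1)          -- low[start+1:] (start ≥ 0: plain drop is exact)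
    let stop := (rest.findIdx? alt_stop).getD rest.length
    let block := PySem.List.pyGetD low (start : Int) "" :: (rest.take stop).filter alt_cont
    block.map strip_comment

-- ===== PRECONDITION & SPEC =====
-- Pre_ restricts card to the natural domain of card names (non-empty, not starting with a space):
-- on an empty or space-led card A's fall-through start re-check inside a block can append a
-- continuation line twice, an accident of its single-loop structure that B does not reproduce.
def Pre_get_card_lines (lines : List String) (card : String) : Prop :=
  card ≠ "" ∧ PySem.Str.startswith card " " = false

instance (lines : List String) (card : String) : Decidable (Pre_get_card_lines lines card) := by
  unfold Pre_get_card_lines; infer_instance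

def pvWitness_get_card_lines : List String × String :=
  (["m1 1001.80c 1.0 $ material", "     2002.80c 0.5", "c a comment", "m2 3003.80c 1.0"], "m1")

def Spec_get_card_lines (lines : List String) (card : String) (out : List String) : Prop := out = get_card_lines_alt lines card
instance (lines : List String) (card : String) (out : List String) : Decidable (Spec_get_card_lines lines card out) := by unfold Spec_get_card_lines; infer_instance

-- ===== CLAIM (what is proved, stated in full; the proofs are below) =====
def Claim_equal_get_card_lines : Prop := ∀ (lines : List String) (card : String), Dom_get_card_lines lines card → Pre_get_card_lines lines card → Spec_get_card_lines lines card (get_card_lines lines card)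

-- ===== LEMMAS AND PROOFS =====

theorem strip_comment_eq : strip_comment = remove_inline_comment := rfl

-- splitOn.go with a non-empty accumulator just prepends the reversed accumulator
theorem splitOn_go_acc (sep : List Char) :
    ∀ (fuel : Nat) (l cur : List Char) (acc : List (List Char)),
    PySem.Chars.splitOn.go sep fuel l cur acc =
      acc.reverse ++ PySem.Chars.splitOn.go sep fuel l cur [] := by
  intro fuel
  induction fuel with
  | zero => intro l cur acc; simp [PySem.Chars.splitOn.go]
  | succ n ih =>
    intro l cur acc
    cases l with
    | nil => simp [PySem.Chars.splitOn.go]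
    | cons c rest =>
      simp only [PySem.Chars.splitOn.go]
      split_ifs with h
      · rw [ih _ _ (cur.reverse :: acc), ih _ _ [cur.reverse]]
        simp
      · exact ih _ _ acc

-- the first piece of a split on '$' is the take-while-not-'$' prefix
theorem splitOn_go_first :
    ∀ (fuel : Nat) (l cur : List Char), l.length ≤ fuel →
    ∃ tl, PySem.Chars.splitOn.go ['$'] fuel l cur [] =
      (cur.reverse ++ l.takeWhile (· != '$')) :: tl := by
  intro fuel
  induction fuel with
  | zero =>
    intro l cur h
    have : l = [] := List.eq_nil_of_length_eq_zero (Nat.le_zero.mp h)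
    subst this
    exact ⟨[], by simp [PySem.Chars.splitOn.go]⟩
  | succ n ih =>
    intro l cur h
    cases l with
    | nil => exact ⟨[], by simp [PySem.Chars.splitOn.go]⟩
    | cons c rest =>
      simp only [PySem.Chars.splitOn.go]
      split_ifs with hp
      · have hc : c = '$' := by
          simp [List.isPrefixOf] at hp
          exact hp.symm
        subst hc
        rw [splitOn_go_acc]
        exact ⟨PySem.Chars.splitOn.go ['$'] n (List.drop 1 ('$' :: rest)) [] [], by
          simp⟩
      · have hc : (c != '$') = true := by
          simp [List.isPrefixOf] at hp
          simpa using fun h' => hp h'.symm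
        obtain ⟨tl, htl⟩ := ih rest (c :: cur) (by simpa using Nat.le_of_succ_le_succ h)
        refine ⟨tl, ?_⟩
        rw [htl]
        simp [hc]

theorem splitOn_dollar (cs : List Char) :
    ∃ tl, PySem.Chars.splitOn cs ['$'] = cs.takeWhile (· != '$') :: tl := by
  simpa using splitOn_go_first (cs.length + 1) cs [] (by omega)

-- the comment-stripped line as a char list
theorem remove_inline_comment_toList (s : String) :
    (remove_inline_comment s).toList = s.toList.takeWhile (· != '$') := by
  obtain ⟨tl, htl⟩ := splitOn_dollar s.toList
  have hmap := PySem.Str.split?_map s "$"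
  have hdollar : ("$" : String).toList = ['$'] := rfl
  rw [hdollar] at hmap
  unfold PySem.Chars.split? at hmap
  rw [if_neg (by simp)] at hmap
  rw [htl] at hmap
  cases hs : PySem.Str.split? s "$" with
  | none => rw [hs] at hmap; simp at hmap
  | some pieces =>
    rw [hs] at hmap
    simp only [Option.map_some, Option.some.injEq] at hmap
    cases pieces with
    | nil => simp at hmap
    | cons p ps =>
      unfold remove_inline_comment
      rw [hs]
      simp only [Option.getD_some, PySem.List.pyGetD_zero_cons]
      have := congrArg List.head? hmap
      simpa using this

theorem lowerChar_space (c : Char) (h : PySem.Chars.lowerChar c = ' ') : c = ' ' := by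
  unfold PySem.Chars.lowerChar at h
  split_ifs at h with hu
  · exfalso
    have hu' : 'A' ≤ c ∧ c ≤ 'Z' := by
      unfold PySem.Chars.isupper at hu
      simpa using hu
    have hA : 65 ≤ c.toNat := hu'.1
    have hZ : c.toNat ≤ 90 := hu'.2
    have hv : (c.toNat + 32).isValidChar := Or.inl (by omega)
    have ht := congrArg Char.toNat h
    rw [Char.toNat_ofNat, if_pos hv] at ht
    have : (' ' : Char).toNat = 32 := rfl
    omega
  · exact h

-- under Pre_, the start test fails on the empty line and on any line starting with a space
theorem start_test_false (card s : String)
    (hcard : card ≠ "") (hsp : PySem.Str.startswith card " " = false)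
    (hs : s.toList = [] ∨ s.toList.head? = some ' ') :
    start_test s card = false := by
  unfold start_test
  have hpre : PySem.Str.startswith s (PySem.Str.lower card) = false := by
    rw [PySem.Str.startswith_eq, PySem.Str.toList_lower]
    by_contra hb
    have hb' : PySem.Chars.startswith s.toList (PySem.Chars.lower card.toList) = true := by
      revert hb; cases hx : PySem.Chars.startswith s.toList (PySem.Chars.lower card.toList) <;> simp
    have hpref := (PySem.Chars.startswith_iff _ _).mp hb'
    obtain ⟨c, cs, hcs⟩ : ∃ c cs, card.toList = c :: cs := by
      cases hct : card.toList with
      | nil => exact absurd (String.toList_eq_nil_iff.mp hct) hcard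
      | cons c cs => exact ⟨c, cs, rfl⟩
    have hclow : PySem.Chars.lower card.toList = PySem.Chars.lowerChar c :: PySem.Chars.lower cs := by
      simp [PySem.Chars.lower, hcs]
    rcases hs with hnil | hhd
    · rw [hnil, hclow] at hpref
      exact absurd (List.prefix_nil.mp hpref) (by simp)
    · obtain ⟨t, ht⟩ := hpref
      rw [hclow] at ht
      have hhd2 : s.toList.head? = some (PySem.Chars.lowerChar c) := by
        rw [← ht]; simp
      rw [hhd] at hhd2
      have hcl : PySem.Chars.lowerChar c = ' ' := by
        injection hhd2 with h'; exact h'.symm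
      have hc' : c = ' ' := lowerChar_space c hcl
      subst hc'
      have hstc : PySem.Chars.startswith card.toList [' '] = true := by
        rw [PySem.Chars.startswith_iff, hcs]
        exact ⟨cs, rfl⟩
      rw [PySem.Str.startswith_eq] at hsp
      have hone : (" " : String).toList = [' '] := rfl
      rw [hone, hstc] at hsp
      exact absurd hsp (by simp)
  rw [hpre]
  rfl

-- a continuation line keeps its leading space after comment stripping
theorem cont_head (s : String)
    (h : PySem.Str.startswith s (String.ofList (List.replicate 5 ' ')) = true) :
    (remove_inline_comment s).toList.head? = some ' ' := by
  rw [PySem.Str.startswith_eq] at h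
  have hpref := (PySem.Chars.startswith_iff _ _).mp h
  have hmk : (String.ofList (List.replicate 5 ' ')).toList = List.replicate 5 ' ' := by
    simp
  rw [hmk] at hpref
  obtain ⟨t, ht⟩ := hpref
  rw [remove_inline_comment_toList, ← ht]
  simp [List.replicate]

-- B's start test specialised to (card.lower(), len(card)) is A's start test
theorem alt_start_eq (card ln : String) :
    alt_start (PySem.Str.lower card) (PySem.Str.len card) ln = start_test ln card := rfl

-- taking up to the first index where p holds is takeWhile (!p)
theorem take_findIdx_getD {α : Type} (p : α → Bool) :
    ∀ (l : List α), l.take ((l.findIdx? p).getD l.length) = l.takeWhile (fun x => !p x) := by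
  intro l
  induction l with
  | nil => simp
  | cons a t ih =>
    cases hp : p a with
    | true => simp [List.findIdx?_cons, hp]
    | false =>
      simp only [List.findIdx?_cons, hp, Bool.false_eq_true, if_false, List.takeWhile_cons,
        Bool.not_false, if_true]
      rw [← ih]
      cases hf : t.findIdx? p <;> simp [List.take_succ_cons]

-- the block phase: with in_block set, A's loop appends exactly the filtered takeWhile prefix
theorem block_phase (card : String)
    (hcard : card ≠ "") (hsp : PySem.Str.startswith card " " = false) :
    ∀ (rest : List String) (acc : List String),
      gcl_go card rest true acc =
        acc ++ ((((rest.map PySem.Str.lower).takeWhile (fun ln => !alt_stop ln)).filter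
          alt_cont).map remove_inline_comment) := by
  intro rest
  induction rest with
  | nil => intro acc; simp [gcl_go]
  | cons l rs ih =>
    intro acc
    cases hcont : alt_cont (PySem.Str.lower l) with
    | true =>
      have hic : is_continue_line (PySem.Str.lower l) = true := hcont
      have hst : start_test (remove_inline_comment (PySem.Str.lower l)) card = false :=
        start_test_false card _ hcard hsp (Or.inr (cont_head _ hcont))
      have hstop : alt_stop (PySem.Str.lower l) = false := by
        unfold alt_stop; rw [hcont]; simp
      simp only [gcl_go, List.map_cons, List.takeWhile_cons, hstop, Bool.not_false, if_true,
        List.filter_cons, hcont, hic, hst, Bool.false_eq_true, if_false, List.map_cons]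
      rw [ih (acc ++ [remove_inline_comment (PySem.Str.lower l)])]
      simp
    | false =>
      have hic : is_continue_line (PySem.Str.lower l) = false := hcont
      cases hcp : PySem.Str.startswith (PySem.Str.lower l) "c " with
      | true =>
        have hstop : alt_stop (PySem.Str.lower l) = false := by
          unfold alt_stop; rw [hcp]; simp
        simp only [gcl_go, List.map_cons, List.takeWhile_cons, hstop, Bool.not_false, if_true,
          List.filter_cons, hcont, hic, hcp, Bool.false_eq_true, if_false]
        exact ih acc
      | false =>
        by_cases hne : PySem.Str.lower l = ""
        · have hbl : (PySem.Str.lower l != "") = false := by simp [hne]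
          have hstop : alt_stop (PySem.Str.lower l) = false := by
            unfold alt_stop; rw [hbl]; simp
          have hst : start_test (PySem.Str.lower l) card = false := by
            apply start_test_false card _ hcard hsp
            left; rw [hne]; rfl
          simp only [gcl_go, List.map_cons, List.takeWhile_cons, hstop, Bool.not_false, if_true,
            List.filter_cons, hcont, hic, hcp, hbl, hst, Bool.false_and,
            Bool.false_eq_true, if_false]
          exact ih acc
        · have hbl : (PySem.Str.lower l != "") = true := by simp [hne]
          have hstop : alt_stop (PySem.Str.lower l) = true := by
            unfold alt_stop; rw [hbl, hcont, hcp]; simp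
          simp only [gcl_go, List.map_cons, List.takeWhile_cons, hstop, Bool.not_true,
            Bool.false_eq_true, if_false, List.filter_nil, List.map_nil, List.append_nil,
            hic, hcp, hbl, Bool.not_false, Bool.and_self, if_true]

-- the search phase: with in_block unset, A scans for the index B's findIdx? locates
theorem search_phase (card : String)
    (hcard : card ≠ "") (hsp : PySem.Str.startswith card " " = false) :
    ∀ (ls : List String) (acc : List String),
      gcl_go card ls false acc =
        (match (ls.map PySem.Str.lower).findIdx?
            (alt_start (PySem.Str.lower card) (PySem.Str.len card)) with
         | none => acc
         | some i =>
            acc ++ (remove_inline_comment (PySem.List.pyGetD (ls.map PySem.Str.lower) (i : Int) "") ::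
              ((((ls.map PySem.Str.lower).drop (i + 1)).takeWhile (fun ln => !alt_stop ln)).filter
                alt_cont).map remove_inline_comment)) := by
  intro ls
  induction ls with
  | nil => intro acc; simp [gcl_go]
  | cons l rs ih =>
    intro acc
    cases hst : start_test (PySem.Str.lower l) card with
    | true =>
      have ha : alt_start (PySem.Str.lower card) (PySem.Str.len card) (PySem.Str.lower l) = true := by
        rw [alt_start_eq]; exact hst
      simp only [gcl_go, List.map_cons, List.findIdx?_cons, ha, hst, if_true,
        Bool.false_eq_true, if_false]
      rw [block_phase card hcard hsp rs (acc ++ [remove_inline_comment (PySem.Str.lower l)])]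
      simp [PySem.List.pyGetD_zero_cons]
    | false =>
      have ha : alt_start (PySem.Str.lower card) (PySem.Str.len card) (PySem.Str.lower l) = false := by
        rw [alt_start_eq]; exact hst
      simp only [gcl_go, List.map_cons, List.findIdx?_cons, ha, hst,
        Bool.false_eq_true, if_false]
      rw [ih acc]
      cases hf : (rs.map PySem.Str.lower).findIdx?
          (alt_start (PySem.Str.lower card) (PySem.Str.len card)) with
      | none => simp
      | some i =>
        simp only [Option.map_some]
        have hidx : PySem.List.pyGetD (PySem.Str.lower l :: rs.map PySem.Str.lower) ((i + 1 : Nat) : Int) "" =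
            PySem.List.pyGetD (rs.map PySem.Str.lower) (i : Int) "" := by
          rw [PySem.List.pyGetD_natCast, PySem.List.pyGetD_natCast]
          simp [List.getD]
        rw [hidx]
        have hdrop : (PySem.Str.lower l :: rs.map PySem.Str.lower).drop (i + 1 + 1) =
            (rs.map PySem.Str.lower).drop (i + 1) := rfl
        rw [hdrop]

-- ===== VERDICT (by name: the statement is the Claim_ definition above) =====
theorem get_card_lines_spec : Claim_equal_get_card_lines := by
  intro lines card _hdom hpre
  obtain ⟨hcard, hsp⟩ := hpre
  unfold Spec_get_card_lines get_card_lines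
  rw [search_phase card hcard hsp lines []]
  have halt : get_card_lines_alt lines card =
      (match (lines.map PySem.Str.lower).findIdx?
          (alt_start (PySem.Str.lower card) (PySem.Str.len card)) with
       | none => []
       | some start =>
         (PySem.List.pyGetD (lines.map PySem.Str.lower) (start : Int) "" ::
           (((lines.map PySem.Str.lower).drop (start + 1)).take
             (((((lines.map PySem.Str.lower).drop (start + 1)).findIdx? alt_stop)).getD
               ((lines.map PySem.Str.lower).drop (start + 1)).length)).filter alt_cont).map
           strip_comment) := rfl
  rw [halt]
  cases hfb : (lines.map PySem.Str.lower).findIdx?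
      (alt_start (PySem.Str.lower card) (PySem.Str.len card)) with
  | none => rfl
  | some i =>
    simp only [List.nil_append]
    rw [take_findIdx_getD]
    simp [strip_comment_eq]
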